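-- pv_equiv track=rewrite | github.com/molya-polat/LeetCode_practice | problems/3690-split-and-merge-array-transformation/3690-split-and-merge-array-transformation.py | minSplitMerge
-- ===== SOURCE A (Python) =====
-- from typing import List
--
-- from collections import deque
--
-- def minSplitMerge(nums1: List[int], nums2: List[int]) -> int:
--     def hash(arr):
--         return str(arr)
--
--     visited = set()
--
--     def neighbours_arr(arr):
--         nbs = []
--         for l in range(len(arr)):
--             for r in range(l, len(arr)):
--                 remaining_arr = arr[:l] + arr[r + 1:]
--                 removed_arr = arr[l:r + 1]
--
--                 for i in range(len(remaining_arr) + 1):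
--                     new_arr = remaining_arr[:i] + removed_arr + remaining_arr[i:]
--                     nbs.append(new_arr)
--         return nbs
--
--     q = deque()
--     q.append((nums1, 0))
--     visited.add(hash(nums1))
--
--     while q:
--         cur_node, dist = q.popleft()
--         if cur_node == nums2:
--             return dist
--
--         for nb in neighbours_arr(cur_node):
--             if hash(nb) not in visited:
--                 visited.add(hash(nb))
--                 q.append((nb, dist + 1))
--
--     return -1
-- ===== SOURCE B (Python) =====
-- from typing import List
--
--
-- def minSplitMerge(nums1: List[int], nums2: List[int]) -> int:
--     # Fixed-point ball expansion instead of a BFS queue: grow the complete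
--     # reachability ball of nums1 one radius at a time (ball_{k+1} = ball_k
--     # together with every move-image of ball_k) and return the first radius
--     # containing nums2; -1 when the ball stops growing.  No queue, no
--     # frontier, no visited-filter during generation — termination and the
--     # distance both come from the fixpoint iteration itself.
--     def moves(arr):
--         # every array obtained by cutting out one block (by length, then
--         # start) and reinserting it somewhere
--         n = len(arr)
--         res = []
--         for length in range(1, n + 1):
--             for l in range(n - length + 1):
--                 rest = arr[:l] + arr[l + length:]
--                 block = arr[l:l + length]
--                 for i in range(len(rest) + 1):
--                     res.append(rest[:i] + block + rest[i:])
--         return res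
--
--     target = tuple(nums2)
--     ball = {tuple(nums1)}
--     radius = 0
--     while True:
--         if target in ball:
--             return radius
--         bigger = set(ball)
--         for a in ball:
--             for nb in moves(list(a)):
--                 bigger.add(tuple(nb))
--         if len(bigger) == len(ball):
--             return -1
--         ball = bigger
--         radius += 1
-- ===== Notes on version B (the rewrite author's own statement) =====
-- stated objective: alternative
-- what changed: Replaces A's queue BFS (deque of (node,dist) pairs, str-hash visited set filtering neighbours as they are generated) by a fixpoint iteration of the reachability operator: a single set 'ball' is repeatedly replaced by ball union moves(ball), recomputed from the whole ball each round with no queue, frontier or visited filter; the answer is the first radius whose ball contains nums2, and -1 is detected by the ball stabilising instead of by the queue draining; the move set is enumerated by block length rather than by (l,r).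
import Mathlib
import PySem

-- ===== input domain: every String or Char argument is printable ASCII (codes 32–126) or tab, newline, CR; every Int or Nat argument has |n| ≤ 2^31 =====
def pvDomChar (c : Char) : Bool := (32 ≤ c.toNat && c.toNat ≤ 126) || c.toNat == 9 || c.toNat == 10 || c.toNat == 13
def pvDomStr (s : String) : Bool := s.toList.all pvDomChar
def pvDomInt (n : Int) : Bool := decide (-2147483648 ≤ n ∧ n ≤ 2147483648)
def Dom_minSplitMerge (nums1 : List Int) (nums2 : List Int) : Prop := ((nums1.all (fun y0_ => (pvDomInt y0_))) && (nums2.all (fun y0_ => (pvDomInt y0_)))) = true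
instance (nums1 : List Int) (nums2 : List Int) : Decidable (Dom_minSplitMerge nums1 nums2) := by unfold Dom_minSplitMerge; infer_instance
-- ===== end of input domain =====

-- B replaces A's queue BFS (deque of (node, dist) pairs, str-hash visited set filtering
-- neighbours as generated) by a fixpoint iteration of the reachability operator: one set
-- 'ball' repeatedly replaced by ball ∪ moves(ball); answer = first radius containing nums2,
-- -1 when the ball stabilises (alternative decomposition, not claimed faster).

-- ===== PORT A =====

-- hash(arr) = str(arr); modelled exactly as the character list of "[a, b, …]"
-- (PySem.Int.toChars c = characters of str(c)); used only as a set key.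
def pvJoin : List Int → List Char
  | [] => []
  | [x] => PySem.Int.toChars x
  | x :: y :: xs => PySem.Int.toChars x ++ ',' :: ' ' :: pvJoin (y :: xs)

def pvHash (arr : List Int) : List Char := '[' :: (pvJoin arr ++ [']'])

-- neighbours_arr: the triple loop, appending in the same order
-- (slices arr[:l], arr[r+1:], arr[l:r+1], rem[:i], rem[i:] are exact take/drop here: indices are in-range Nats)
def pvNeighbours (arr : List Int) : List (List Int) :=
  (List.range arr.length).flatMap (fun l =>
    (List.range' l (arr.length - l)).flatMap (fun r =>
      let remaining := arr.take l ++ arr.drop (r + 1)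
      let removed := (arr.drop l).take (r + 1 - l)
      (List.range (remaining.length + 1)).map (fun i =>
        remaining.take i ++ removed ++ remaining.drop i)))

-- the while-q loop; fuel is a totality guard only (one unit per popped node; the
-- visited set bounds the number of pops, so the chosen fuel is never exhausted)
def pvRunA (nums2 : List Int) : Nat → List (List Int × Int) → PySem.Set (List Char) → Int
  | _, [], _ => -1
  | 0, _ :: _, _ => -1
  | fuel + 1, (cur, dist) :: rest, visited =>
    if cur = nums2 then dist
    else
      let st := (pvNeighbours cur).foldl
        (fun (st : List (List Int × Int) × PySem.Set (List Char)) nb =>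
          if pvHash nb ∈ st.2 then st
          else (st.1 ++ [(nb, dist + 1)], PySem.Set.add st.2 (pvHash nb)))
        (rest, visited)
      pvRunA nums2 fuel st.1 st.2

def minSplitMerge (nums1 : List Int) (nums2 : List Int) : Int :=
  pvRunA nums2 ((nums1.length + 1) ^ (nums1.length + 1) + 1)
    [(nums1, 0)] (PySem.Set.ofList [pvHash nums1])

-- ===== PORT B =====

-- moves(arr): every array obtained by cutting one block (by length, then start)
-- and reinserting it; slices are in-range, so take/drop are exact
def pvMoves (arr : List Int) : List (List Int) :=
  (List.range' 1 arr.length).flatMap (fun len =>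
    (List.range (arr.length - len + 1)).flatMap (fun l =>
      let rest := arr.take l ++ arr.drop (l + len)
      let block := (arr.drop l).take len
      (List.range (rest.length + 1)).map (fun i =>
        rest.take i ++ block ++ rest.drop i)))

-- bigger = set(ball); for a in ball: for nb in moves(a): bigger.add(nb)
def pvGrow (ball : PySem.Set (List Int)) : PySem.Set (List Int) :=
  ball.foldl (fun big a => (pvMoves a).foldl (fun b nb => PySem.Set.add b nb) big) ball

-- the 'while True' loop; fuel is a totality guard only (one unit per round; the ball
-- strictly grows inside a finite state space, so the chosen fuel is never exhausted)
def pvClosure (target : List Int) : Nat → PySem.Set (List Int) → Int → Int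
  | 0, _, _ => -1
  | fuel + 1, ball, radius =>
    if target ∈ ball then radius
    else
      let bigger := pvGrow ball
      if bigger.length = ball.length then -1
      else pvClosure target fuel bigger (radius + 1)

def minSplitMerge_alt (nums1 : List Int) (nums2 : List Int) : Int :=
  pvClosure nums2 ((nums1.length + 1) ^ (nums1.length + 1) + 1)
    (PySem.Set.ofList [nums1]) 0

-- ===== PRECONDITION & SPEC =====
def Spec_minSplitMerge (nums1 : List Int) (nums2 : List Int) (out : Int) : Prop := out = minSplitMerge_alt nums1 nums2
instance (nums1 : List Int) (nums2 : List Int) (out : Int) : Decidable (Spec_minSplitMerge nums1 nums2 out) := by unfold Spec_minSplitMerge; infer_instance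

-- ===== CLAIM (what is proved, stated in full; the proofs are below) =====
def Claim_equal_minSplitMerge : Prop := ∀ (nums1 : List Int) (nums2 : List Int), Dom_minSplitMerge nums1 nums2 → Spec_minSplitMerge nums1 nums2 (minSplitMerge nums1 nums2)

-- ===== LEMMAS AND PROOFS =====

-- ---------------------------------------------------------------------------
-- Stage 1 (proof infrastructure): a level-synchronous reformulation of A's
-- queue BFS (pvExpand/pvScan/pvLevels) and the simulation pvRunA = pvLevels.
-- ---------------------------------------------------------------------------

def pvExpand (arr : List Int) (st0 : PySem.Set (List Int) × List (List Int)) :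
    PySem.Set (List Int) × List (List Int) :=
  (List.range arr.length).foldl (fun st l =>
    (List.range' l (arr.length - l)).foldl (fun st r =>
      let rest := arr.take l ++ arr.drop (r + 1)
      let block := (arr.drop l).take (r + 1 - l)
      (List.range (rest.length + 1)).foldl (fun st i =>
        let nb := rest.take i ++ block ++ rest.drop i
        if nb ∈ st.1 then st else (PySem.Set.add st.1 nb, st.2 ++ [nb])) st) st) st0

def pvScan (target : List Int) : Nat → List (List Int) → List (List Int) →
    PySem.Set (List Int) → Int → Sum Int (Nat × List (List Int) × PySem.Set (List Int))
  | fuel, [], next, seen, _ => .inr (fuel, next, seen)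
  | 0, _ :: _, _, _, _ => .inl (-1)
  | fuel + 1, arr :: rest, next, seen, dist =>
    if arr = target then .inl dist
    else
      let st := pvExpand arr (seen, next)
      pvScan target fuel rest st.2 st.1 dist

theorem pvScan_fuel_le (target : List Int) : ∀ (F : List (List Int)) (fuel : Nat)
    (next seen) (dist : Int) (f' : Nat) (next' seen'),
    pvScan target fuel F next seen dist = .inr (f', next', seen') → f' ≤ fuel := by
  intro F
  induction F with
  | nil => intro fuel next seen dist f' next' seen' h
           simp [pvScan] at h; omega
  | cons a F ih =>
    intro fuel next seen dist f' next' seen' h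
    cases fuel with
    | zero => simp [pvScan] at h
    | succ fuel =>
      simp only [pvScan] at h
      split at h
      · exact absurd h (by simp)
      · exact Nat.le_succ_of_le (ih _ _ _ _ _ _ _ h)

theorem pvScan_fuel_lt (target : List Int) (a : List Int) (F : List (List Int))
    (fuel : Nat) (next seen) (dist : Int) (f' : Nat) (next' seen')
    (h : pvScan target fuel (a :: F) next seen dist = .inr (f', next', seen')) :
    f' < fuel := by
  cases fuel with
  | zero => simp [pvScan] at h
  | succ fuel =>
    simp only [pvScan] at h
    split at h
    · exact absurd h (by simp)
    · exact Nat.lt_succ_of_le (pvScan_fuel_le target F fuel _ _ dist _ _ _ h)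

def pvLevels (target : List Int) (fuel : Nat) (frontier : List (List Int))
    (seen : PySem.Set (List Int)) (dist : Int) : Int :=
  match frontier with
  | [] => -1
  | a :: rest =>
    match h : pvScan target fuel (a :: rest) [] seen dist with
    | .inl ans => ans
    | .inr (f', next, seen') => pvLevels target f' next seen' (dist + 1)
  termination_by fuel
  decreasing_by exact pvScan_fuel_lt target a rest fuel [] seen dist f' next seen' h

-- --- str(n) (= PySem.Int.toChars) is injective, nonempty and comma-free ---

theorem pv_digitChar_toNat (k : Nat) (h : k < 10) : (Nat.digitChar k).toNat = k + 48 := by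
  interval_cases k <;> decide

theorem pv_tdc_append (fuel : Nat) : ∀ (n : Nat) (ds : List Char),
    Nat.toDigitsCore 10 fuel n ds = Nat.toDigitsCore 10 fuel n [] ++ ds := by
  induction fuel with
  | zero => intro n ds; simp [Nat.toDigitsCore]
  | succ fuel ih =>
    intro n ds
    simp only [Nat.toDigitsCore]
    split
    · simp
    · rw [ih (n / 10) (Nat.digitChar (n % 10) :: ds), ih (n / 10) [Nat.digitChar (n % 10)]]
      simp

theorem pv_tdc_digits (fuel : Nat) : ∀ (n : Nat) (c : Char),
    c ∈ Nat.toDigitsCore 10 fuel n [] → 48 ≤ c.toNat ∧ c.toNat ≤ 57 := by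
  induction fuel with
  | zero => intro n c h; simp [Nat.toDigitsCore] at h
  | succ fuel ih =>
    intro n c h
    have hd : (Nat.digitChar (n % 10)).toNat = n % 10 + 48 :=
      pv_digitChar_toNat _ (Nat.mod_lt _ (by omega))
    have hm : n % 10 < 10 := Nat.mod_lt _ (by omega)
    simp only [Nat.toDigitsCore] at h
    split at h
    · simp at h; subst h; omega
    · rw [pv_tdc_append] at h
      rcases List.mem_append.mp h with h' | h'
      · exact ih _ _ h'
      · simp at h'; subst h'; omega

theorem pv_tdc_val (fuel : Nat) : ∀ (n : Nat), n < fuel →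
    (Nat.toDigitsCore 10 fuel n []).foldl (fun a c => 10 * a + (c.toNat - 48)) 0 = n := by
  induction fuel with
  | zero => intro n h; omega
  | succ fuel ih =>
    intro n h
    have hm : n % 10 < 10 := Nat.mod_lt _ (by omega)
    have hd : (Nat.digitChar (n % 10)).toNat = n % 10 + 48 := pv_digitChar_toNat _ hm
    simp only [Nat.toDigitsCore]
    split
    · rename_i h0
      simp only [List.foldl, hd]
      omega
    · rename_i h0
      have hn : 0 < n := by
        rcases Nat.eq_zero_or_pos n with hz | hp
        · subst hz; simp at h0
        · exact hp
      have hlt : n / 10 < fuel := by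
        have := Nat.div_lt_self hn (by omega : 1 < 10)
        omega
      rw [pv_tdc_append, List.foldl_append, ih _ hlt]
      simp only [List.foldl, hd]
      omega

theorem pv_toDigits_inj (m n : Nat) (h : Nat.toDigits 10 m = Nat.toDigits 10 n) : m = n := by
  have hm := pv_tdc_val (m + 1) m (by omega)
  have hn := pv_tdc_val (n + 1) n (by omega)
  unfold Nat.toDigits at h
  rw [h] at hm
  rw [hm] at hn
  omega

theorem pv_toDigits_ne_nil (n : Nat) : Nat.toDigits 10 n ≠ [] := by
  unfold Nat.toDigits
  simp only [Nat.toDigitsCore]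
  split
  · simp
  · rw [pv_tdc_append]; simp

theorem pv_toDigits_digits (n : Nat) (c : Char) (h : c ∈ Nat.toDigits 10 n) :
    48 ≤ c.toNat ∧ c.toNat ≤ 57 :=
  pv_tdc_digits (n + 1) n c h

theorem pv_toChars_tok (k : Int) (c : Char) (h : c ∈ PySem.Int.toChars k) :
    c.toNat = 45 ∨ (48 ≤ c.toNat ∧ c.toNat ≤ 57) := by
  unfold PySem.Int.toChars at h
  split at h
  · rcases List.mem_cons.mp h with h' | h'
    · left; rw [h']; rfl
    · right; exact pv_toDigits_digits _ _ h'
  · right; exact pv_toDigits_digits _ _ h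

theorem pv_toChars_ne_nil (k : Int) : PySem.Int.toChars k ≠ [] := by
  unfold PySem.Int.toChars
  split
  · simp
  · exact pv_toDigits_ne_nil _

theorem pv_toChars_inj (a b : Int) (h : PySem.Int.toChars a = PySem.Int.toChars b) : a = b := by
  unfold PySem.Int.toChars at h
  split at h <;> split at h
  · rename_i ha hb
    have := pv_toDigits_inj _ _ (List.cons.inj h).2
    omega
  · rename_i ha hb
    exfalso
    cases he : Nat.toDigits 10 b.toNat with
    | nil => exact pv_toDigits_ne_nil _ he
    | cons c cs =>
      rw [he] at h
      have hc : c ∈ Nat.toDigits 10 b.toNat := by rw [he]; simp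
      have h48 := (pv_toDigits_digits _ _ hc).1
      have hcm : ('-' : Char) = c := (List.cons.inj h).1
      rw [← hcm] at h48
      have : ('-' : Char).toNat = 45 := rfl
      omega
  · rename_i ha hb
    exfalso
    cases he : Nat.toDigits 10 a.toNat with
    | nil => exact pv_toDigits_ne_nil _ he
    | cons c cs =>
      rw [he] at h
      have hc : c ∈ Nat.toDigits 10 a.toNat := by rw [he]; simp
      have h48 := (pv_toDigits_digits _ _ hc).1
      have hcm : c = ('-' : Char) := (List.cons.inj h).1
      rw [hcm] at h48
      have : ('-' : Char).toNat = 45 := rfl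
      omega
  · rename_i ha hb
    have := pv_toDigits_inj _ _ h
    omega

theorem pv_toChars_no_comma (k : Int) (c : Char) (h : c ∈ PySem.Int.toChars k) : c ≠ ',' := by
  intro hc; subst hc
  have h44 : (',' : Char).toNat = 44 := rfl
  rcases pv_toChars_tok k _ h with h' | h' <;> omega

theorem pv_comma_cancel : ∀ (a : List Char) (b u v : List Char),
    (∀ c ∈ a, c ≠ ',') → (∀ c ∈ b, c ≠ ',') →
    a ++ ',' :: u = b ++ ',' :: v → a = b ∧ u = v := by
  intro a
  induction a with
  | nil =>
    intro b u v _ hb h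
    cases b with
    | nil => simpa using h
    | cons d b' =>
      exfalso
      have : ',' = d := (List.cons.inj (by simpa using h)).1
      exact hb d (by simp) this.symm
  | cons c a' ih =>
    intro b u v ha hb h
    cases b with
    | nil =>
      exfalso
      have : c = ',' := (List.cons.inj (by simpa using h)).1
      exact ha c (by simp) this
    | cons d b' =>
      have h1 : c = d := (List.cons.inj (by simpa using h)).1
      have h2 : a' ++ ',' :: u = b' ++ ',' :: v := (List.cons.inj (by simpa using h)).2
      obtain ⟨he, hu⟩ := ih b' u v (fun x hx => ha x (by simp [hx])) (fun x hx => hb x (by simp [hx])) h2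
      exact ⟨by rw [h1, he], hu⟩

theorem pvJoin_ne_nil (x : Int) (xs : List Int) : pvJoin (x :: xs) ≠ [] := by
  cases xs with
  | nil => simpa [pvJoin] using pv_toChars_ne_nil x
  | cons y ys => simp [pvJoin]

theorem pvJoin_inj : ∀ (xs ys : List Int), pvJoin xs = pvJoin ys → xs = ys := by
  intro xs
  induction xs with
  | nil =>
    intro ys h
    cases ys with
    | nil => rfl
    | cons y ys' => exact absurd h.symm (pvJoin_ne_nil y ys')
  | cons x xs' ih =>
    intro ys h
    cases ys with
    | nil => exact absurd h (pvJoin_ne_nil x xs')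
    | cons y ys' =>
      cases xs' with
      | nil =>
        cases ys' with
        | nil =>
          simp only [pvJoin] at h
          rw [pv_toChars_inj x y h]
        | cons z zs =>
          exfalso
          simp only [pvJoin] at h
          have : (',' : Char) ∈ PySem.Int.toChars x := by
            rw [h]; simp
          exact pv_toChars_no_comma x ',' this rfl
      | cons w ws =>
        cases ys' with
        | nil =>
          exfalso
          simp only [pvJoin] at h
          have : (',' : Char) ∈ PySem.Int.toChars y := by
            rw [← h]; simp
          exact pv_toChars_no_comma y ',' this rfl
        | cons z zs =>
          simp only [pvJoin] at h
          obtain ⟨h1, h2⟩ := pv_comma_cancel _ _ _ _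
            (fun c hc => pv_toChars_no_comma x c hc)
            (fun c hc => pv_toChars_no_comma y c hc) h
          have h3 : pvJoin (w :: ws) = pvJoin (z :: zs) := (List.cons.inj h2).2
          rw [pv_toChars_inj x y h1, ih _ h3]

theorem pvHash_inj (xs ys : List Int) (h : pvHash xs = pvHash ys) : xs = ys := by
  unfold pvHash at h
  exact pvJoin_inj xs ys (List.append_cancel_right (List.cons.inj h).2)

theorem pvHash_mem_map (nb : List Int) (seen : List (List Int)) :
    pvHash nb ∈ seen.map pvHash ↔ nb ∈ seen := by
  constructor
  · intro h
    rcases List.mem_map.mp h with ⟨x, hx, he⟩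
    rwa [← pvHash_inj x nb he]
  · intro h; exact List.mem_map_of_mem h

theorem pvExpand_eq_foldl (arr : List Int) (st0 : PySem.Set (List Int) × List (List Int)) :
    pvExpand arr st0 = (pvNeighbours arr).foldl
      (fun st nb => if nb ∈ st.1 then st else (PySem.Set.add st.1 nb, st.2 ++ [nb])) st0 := by
  unfold pvExpand pvNeighbours
  rw [List.foldl_flatMap]
  congr 1
  funext st l
  rw [List.foldl_flatMap]
  congr 1
  funext st r
  rw [List.foldl_map]

theorem pv_expand_sim (nbs : List (List Int)) (dist : Int) :
    ∀ (qpre : List (List Int × Int)) (P : List (List Int)) (seen : List (List Int)),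
    nbs.foldl
      (fun (st : List (List Int × Int) × PySem.Set (List Char)) nb =>
        if pvHash nb ∈ st.2 then st
        else (st.1 ++ [(nb, dist + 1)], PySem.Set.add st.2 (pvHash nb)))
      (qpre ++ P.map (fun a => (a, dist + 1)), seen.map pvHash) =
    (qpre ++ ((nbs.foldl
        (fun st nb => if nb ∈ st.1 then st else (PySem.Set.add st.1 nb, st.2 ++ [nb]))
        (seen, P)).2).map (fun a => (a, dist + 1)),
      ((nbs.foldl
        (fun st nb => if nb ∈ st.1 then st else (PySem.Set.add st.1 nb, st.2 ++ [nb]))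
        (seen, P)).1).map pvHash) := by
  induction nbs with
  | nil => intro qpre P seen; rfl
  | cons nb nbs ih =>
    intro qpre P seen
    simp only [List.foldl_cons]
    by_cases hmem : nb ∈ seen
    · rw [if_pos ((pvHash_mem_map nb seen).mpr hmem), if_pos hmem]
      exact ih qpre P seen
    · rw [if_neg (fun hc => hmem ((pvHash_mem_map nb seen).mp hc)), if_neg hmem]
      have hadd : PySem.Set.add (seen.map pvHash) (pvHash nb) = (seen ++ [nb]).map pvHash := by
        rw [PySem.Set.add_of_not_mem (fun hc => hmem ((pvHash_mem_map nb seen).mp hc))]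
        simp
      have hq : (qpre ++ P.map (fun a => (a, dist + 1))) ++ [(nb, dist + 1)] =
          qpre ++ (P ++ [nb]).map (fun a => (a, dist + 1)) := by simp
      rw [hadd, hq]
      have := ih qpre (P ++ [nb]) (seen ++ [nb])
      simp only at this
      rw [PySem.Set.add_of_not_mem hmem]
      exact this

theorem pv_scan_sim (nums2 : List Int) (dist : Int) :
    ∀ (F : List (List Int)) (fuel : Nat) (P : List (List Int)) (seen : List (List Int)),
    pvRunA nums2 fuel (F.map (fun a => (a, dist)) ++ P.map (fun a => (a, dist + 1)))
      (seen.map pvHash) =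
    (match pvScan nums2 fuel F P seen dist with
     | .inl a => a
     | .inr (f', next, seen') =>
        pvRunA nums2 f' (next.map (fun a => (a, dist + 1))) (seen'.map pvHash)) := by
  intro F
  induction F with
  | nil =>
    intro fuel P seen
    simp [pvScan]
  | cons a F ih =>
    intro fuel P seen
    cases fuel with
    | zero =>
      simp only [List.map_cons, List.cons_append, pvScan, pvRunA]
    | succ fuel =>
      simp only [List.map_cons, List.cons_append, pvScan, pvRunA]
      by_cases ha : a = nums2
      · rw [if_pos ha, if_pos ha]
      · rw [if_neg ha, if_neg ha]
        rw [pvExpand_eq_foldl]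
        have h0 := pv_expand_sim (pvNeighbours a) dist (F.map (fun a => (a, dist))) P seen
        rw [h0]
        exact ih fuel _ _

theorem pv_levels_sim (nums2 : List Int) :
    ∀ (fuel : Nat) (F : List (List Int)) (seen : List (List Int)) (dist : Int),
    pvRunA nums2 fuel (F.map (fun a => (a, dist))) (seen.map pvHash) =
    pvLevels nums2 fuel F seen dist := by
  intro fuel
  induction fuel using Nat.strong_induction_on with
  | _ fuel ih =>
    intro F seen dist
    cases F with
    | nil =>
      cases fuel <;> simp [pvRunA, pvLevels]
    | cons a F =>
      rw [pvLevels]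
      have h1 : pvRunA nums2 fuel ((a :: F).map (fun a => (a, dist)) ++
          ([] : List (List Int)).map (fun a => (a, dist + 1))) (seen.map pvHash) =
          pvRunA nums2 fuel ((a :: F).map (fun a => (a, dist))) (seen.map pvHash) := by
        simp
      rw [← h1, pv_scan_sim nums2 dist (a :: F) fuel [] seen]
      cases hscan : pvScan nums2 fuel (a :: F) [] seen dist with
      | inl ans => simp
      | inr t =>
        obtain ⟨f', next, seen'⟩ := t
        simp only
        exact ih f' (pvScan_fuel_lt nums2 a F fuel [] seen dist f' next seen' hscan) next seen' (dist + 1)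

-- ---------------------------------------------------------------------------
-- Stage 2: moves = neighbours (as sets), both preserve the multiset
-- ---------------------------------------------------------------------------

theorem pv_mem_moves_iff (a y : List Int) : y ∈ pvMoves a ↔ y ∈ pvNeighbours a := by
  simp only [pvMoves, pvNeighbours, List.mem_flatMap, List.mem_range, List.mem_range'_1,
    List.mem_map]
  constructor
  · rintro ⟨len, ⟨h1, h2⟩, l, hl, i, hi, rfl⟩
    refine ⟨l, by omega, l + len - 1, ⟨by omega, by omega⟩, i, ?_, ?_⟩
    · have e1 : l + len - 1 + 1 = l + len := by omega
      rw [e1]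
      exact hi
    · have e1 : l + len - 1 + 1 = l + len := by omega
      have e2 : l + len - l = len := by omega
      rw [e1, e2]
  · rintro ⟨l, hl, r, ⟨hr1, hr2⟩, i, hi, rfl⟩
    refine ⟨r + 1 - l, ⟨by omega, by omega⟩, l, by omega, i, ?_, ?_⟩
    · have e1 : l + (r + 1 - l) = r + 1 := by omega
      rw [e1]
      exact hi
    · have e1 : l + (r + 1 - l) = r + 1 := by omega
      rw [e1]

theorem pv_perm_of_mem_neighbours (a y : List Int) (h : y ∈ pvNeighbours a) : y.Perm a := by
  simp only [pvNeighbours, List.mem_flatMap, List.mem_range, List.mem_range'_1, List.mem_map] at h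
  obtain ⟨l, hl, r, ⟨hr1, hr2⟩, i, hi, rfl⟩ := h
  have p2 : (List.take i (a.take l ++ a.drop (r+1)) ++ (a.drop l).take (r+1-l) ++
      List.drop i (a.take l ++ a.drop (r+1))).Perm
      ((a.drop l).take (r+1-l) ++ List.take i (a.take l ++ a.drop (r+1)) ++
      List.drop i (a.take l ++ a.drop (r+1))) :=
    List.Perm.append_right _ List.perm_append_comm
  have e1 : (a.drop l).take (r+1-l) ++ List.take i (a.take l ++ a.drop (r+1)) ++
      List.drop i (a.take l ++ a.drop (r+1)) =
      (a.drop l).take (r+1-l) ++ (a.take l ++ a.drop (r+1)) := by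
    rw [List.append_assoc, List.take_append_drop]
  have h1 := e1 ▸ p2
  have hd : (a.drop l).drop (r+1-l) = a.drop (r+1) := by
    rw [List.drop_drop]; congr 1; omega
  have ha : a = a.take l ++ (a.drop l).take (r+1-l) ++ a.drop (r+1) := by
    rw [List.append_assoc, ← hd, List.take_append_drop, List.take_append_drop]
  have p3 : (a.take l ++ (a.drop l).take (r+1-l) ++ a.drop (r+1)).Perm
      ((a.drop l).take (r+1-l) ++ a.take l ++ a.drop (r+1)) :=
    List.Perm.append_right _ List.perm_append_comm
  have e2 : (a.drop l).take (r+1-l) ++ a.take l ++ a.drop (r+1) =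
      (a.drop l).take (r+1-l) ++ (a.take l ++ a.drop (r+1)) := List.append_assoc _ _ _
  have h2 : a.Perm ((a.drop l).take (r+1-l) ++ (a.take l ++ a.drop (r+1))) := by
    conv_lhs => rw [ha]
    exact p3.trans (List.Perm.of_eq e2)
  exact h1.trans h2.symm

-- ---------------------------------------------------------------------------
-- Stage 3: characterisation of one level step (pvExpand fold) and of pvGrow
-- ---------------------------------------------------------------------------

def pvStep (st : PySem.Set (List Int) × List (List Int)) (nb : List Int) :
    PySem.Set (List Int) × List (List Int) :=
  if nb ∈ st.1 then st else (PySem.Set.add st.1 nb, st.2 ++ [nb])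

def pvLevelExp (F : List (List Int)) (p : PySem.Set (List Int) × List (List Int)) :
    PySem.Set (List Int) × List (List Int) :=
  F.foldl (fun p a => pvExpand a p) p

theorem pv_stepFold_ext : ∀ (nbs : List (List Int)) (p : PySem.Set (List Int) × List (List Int)),
    ∃ ext, (nbs.foldl pvStep p).1 = p.1 ++ ext ∧ (nbs.foldl pvStep p).2 = p.2 ++ ext := by
  intro nbs
  induction nbs with
  | nil => intro p; exact ⟨[], by simp⟩
  | cons nb nbs ih =>
    intro p
    rw [List.foldl_cons]
    by_cases h : nb ∈ p.1
    · have hs : pvStep p nb = p := by simp [pvStep, h]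
      rw [hs]; exact ih p
    · have hs : pvStep p nb = (p.1 ++ [nb], p.2 ++ [nb]) := by
        simp [pvStep, h]
      rw [hs]
      obtain ⟨ext, h1, h2⟩ := ih (p.1 ++ [nb], p.2 ++ [nb])
      exact ⟨[nb] ++ ext, by simpa using h1, by simpa using h2⟩

theorem pv_stepFold_mem : ∀ (nbs : List (List Int)) (p : PySem.Set (List Int) × List (List Int))
    (x : List Int), x ∈ (nbs.foldl pvStep p).1 ↔ x ∈ p.1 ∨ x ∈ nbs := by
  intro nbs
  induction nbs with
  | nil => intro p x; simp
  | cons nb nbs ih =>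
    intro p x
    rw [List.foldl_cons]
    by_cases h : nb ∈ p.1
    · have hs : pvStep p nb = p := by simp [pvStep, h]
      rw [hs, ih]
      constructor
      · rintro (h1 | h1)
        · exact Or.inl h1
        · exact Or.inr (List.mem_cons_of_mem _ h1)
      · rintro (h1 | h1)
        · exact Or.inl h1
        · rcases List.mem_cons.mp h1 with h2 | h2
          · exact Or.inl (h2 ▸ h)
          · exact Or.inr h2
    · have hs : pvStep p nb = (p.1 ++ [nb], p.2 ++ [nb]) := by
        simp [pvStep, h]
      rw [hs, ih]
      simp only [List.mem_append, List.mem_cons]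
      tauto

theorem pv_stepFold_nodup : ∀ (nbs : List (List Int)) (p : PySem.Set (List Int) × List (List Int)),
    p.1.Nodup → (nbs.foldl pvStep p).1.Nodup := by
  intro nbs
  induction nbs with
  | nil => intro p h; exact h
  | cons nb nbs ih =>
    intro p h
    rw [List.foldl_cons]
    by_cases hm : nb ∈ p.1
    · have hs : pvStep p nb = p := by simp [pvStep, hm]
      rw [hs]; exact ih p h
    · have hs : pvStep p nb = (PySem.Set.add p.1 nb, p.2 ++ [nb]) := by simp [pvStep, hm]
      rw [hs]
      exact ih _ (PySem.Set.nodup_add _ _ h)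

theorem pvExpand_eq_stepFold (arr : List Int) (p : PySem.Set (List Int) × List (List Int)) :
    pvExpand arr p = (pvNeighbours arr).foldl pvStep p := by
  rw [pvExpand_eq_foldl]; rfl

theorem pv_levelExp_ext : ∀ (F : List (List Int)) (S : PySem.Set (List Int)) (nx : List (List Int)),
    ∃ ext, (pvLevelExp F (S, nx)).1 = S ++ ext ∧ (pvLevelExp F (S, nx)).2 = nx ++ ext := by
  intro F
  induction F with
  | nil => intro S nx; exact ⟨[], by simp [pvLevelExp]⟩
  | cons a F ih =>
    intro S nx
    have hstep : pvExpand a (S, nx) =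
        ((pvExpand a (S, nx)).1, (pvExpand a (S, nx)).2) := rfl
    obtain ⟨e1, h1, h2⟩ := pv_stepFold_ext (pvNeighbours a) (S, nx)
    rw [← pvExpand_eq_stepFold] at h1 h2
    have hpair : pvExpand a (S, nx) = (S ++ e1, nx ++ e1) := by
      rw [hstep, h1, h2]
    obtain ⟨e2, g1, g2⟩ := ih (S ++ e1) (nx ++ e1)
    refine ⟨e1 ++ e2, ?_, ?_⟩
    · show (pvLevelExp F (pvExpand a (S, nx))).1 = _
      rw [hpair, g1, List.append_assoc]
    · show (pvLevelExp F (pvExpand a (S, nx))).2 = _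
      rw [hpair, g2, List.append_assoc]

theorem pv_levelExp_mem : ∀ (F : List (List Int)) (p : PySem.Set (List Int) × List (List Int))
    (x : List Int),
    x ∈ (pvLevelExp F p).1 ↔ x ∈ p.1 ∨ ∃ a ∈ F, x ∈ pvNeighbours a := by
  intro F
  induction F with
  | nil => intro p x; simp [pvLevelExp]
  | cons a F ih =>
    intro p x
    have : (pvLevelExp (a :: F) p) = pvLevelExp F (pvExpand a p) := rfl
    rw [this, ih]
    rw [pvExpand_eq_stepFold, pv_stepFold_mem]
    simp only [List.mem_cons]
    constructor
    · rintro ((h | h) | ⟨b, hb, hy⟩)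
      · exact Or.inl h
      · exact Or.inr ⟨a, Or.inl rfl, h⟩
      · exact Or.inr ⟨b, Or.inr hb, hy⟩
    · rintro (h | ⟨b, (rfl | hb), hy⟩)
      · exact Or.inl (Or.inl h)
      · exact Or.inl (Or.inr hy)
      · exact Or.inr ⟨b, hb, hy⟩

theorem pv_levelExp_nodup : ∀ (F : List (List Int)) (p : PySem.Set (List Int) × List (List Int)),
    p.1.Nodup → (pvLevelExp F p).1.Nodup := by
  intro F
  induction F with
  | nil => intro p h; exact h
  | cons a F ih =>
    intro p h
    have : (pvLevelExp (a :: F) p) = pvLevelExp F (pvExpand a p) := rfl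
    rw [this]
    apply ih
    rw [pvExpand_eq_stepFold]
    exact pv_stepFold_nodup _ _ h

theorem pv_addFold_ext : ∀ (L : List (List Int)) (acc : PySem.Set (List Int)),
    ∃ ext, L.foldl (fun b nb => PySem.Set.add b nb) acc = acc ++ ext := by
  intro L
  induction L with
  | nil => intro acc; exact ⟨[], by simp⟩
  | cons nb L ih =>
    intro acc
    rw [List.foldl_cons]
    by_cases h : nb ∈ acc
    · rw [PySem.Set.add_of_mem h]; exact ih acc
    · rw [PySem.Set.add_of_not_mem h]
      obtain ⟨ext, he⟩ := ih (acc ++ [nb])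
      exact ⟨[nb] ++ ext, by simpa using he⟩

theorem pv_addFold_mem : ∀ (L : List (List Int)) (acc : PySem.Set (List Int)) (x : List Int),
    x ∈ L.foldl (fun b nb => PySem.Set.add b nb) acc ↔ x ∈ acc ∨ x ∈ L := by
  intro L
  induction L with
  | nil => intro acc x; simp
  | cons nb L ih =>
    intro acc x
    rw [List.foldl_cons, ih]
    simp only [PySem.Set.mem_add, List.mem_cons]
    tauto

theorem pv_addFold_nodup : ∀ (L : List (List Int)) (acc : PySem.Set (List Int)),
    acc.Nodup → (L.foldl (fun b nb => PySem.Set.add b nb) acc).Nodup := by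
  intro L
  induction L with
  | nil => intro acc h; exact h
  | cons nb L ih =>
    intro acc h
    rw [List.foldl_cons]
    exact ih _ (PySem.Set.nodup_add _ _ h)

theorem pv_growFold_ext : ∀ (L : List (List Int)) (acc : PySem.Set (List Int)),
    ∃ ext, L.foldl (fun big a => (pvMoves a).foldl (fun b nb => PySem.Set.add b nb) big) acc
      = acc ++ ext := by
  intro L
  induction L with
  | nil => intro acc; exact ⟨[], by simp⟩
  | cons a L ih =>
    intro acc
    rw [List.foldl_cons]
    obtain ⟨e1, h1⟩ := pv_addFold_ext (pvMoves a) acc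
    rw [h1]
    obtain ⟨e2, h2⟩ := ih (acc ++ e1)
    exact ⟨e1 ++ e2, by rw [h2, List.append_assoc]⟩

theorem pv_growFold_mem : ∀ (L : List (List Int)) (acc : PySem.Set (List Int)) (x : List Int),
    x ∈ L.foldl (fun big a => (pvMoves a).foldl (fun b nb => PySem.Set.add b nb) big) acc ↔
      x ∈ acc ∨ ∃ a ∈ L, x ∈ pvMoves a := by
  intro L
  induction L with
  | nil => intro acc x; simp
  | cons a L ih =>
    intro acc x
    rw [List.foldl_cons, ih, pv_addFold_mem]
    simp only [List.mem_cons]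
    constructor
    · rintro ((h | h) | ⟨b, hb, hy⟩)
      · exact Or.inl h
      · exact Or.inr ⟨a, Or.inl rfl, h⟩
      · exact Or.inr ⟨b, Or.inr hb, hy⟩
    · rintro (h | ⟨b, (rfl | hb), hy⟩)
      · exact Or.inl (Or.inl h)
      · exact Or.inl (Or.inr hy)
      · exact Or.inr ⟨b, hb, hy⟩

theorem pv_growFold_nodup : ∀ (L : List (List Int)) (acc : PySem.Set (List Int)),
    acc.Nodup → (L.foldl (fun big a => (pvMoves a).foldl (fun b nb => PySem.Set.add b nb) big) acc).Nodup := by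
  intro L
  induction L with
  | nil => intro acc h; exact h
  | cons a L ih =>
    intro acc h
    rw [List.foldl_cons]
    exact ih _ (pv_addFold_nodup _ _ h)

theorem pv_grow_ext (B : PySem.Set (List Int)) : ∃ ext, pvGrow B = B ++ ext :=
  pv_growFold_ext B B

theorem pv_grow_mem (B : PySem.Set (List Int)) (x : List Int) :
    x ∈ pvGrow B ↔ x ∈ B ∨ ∃ a ∈ B, x ∈ pvMoves a :=
  pv_growFold_mem B B x

theorem pv_grow_nodup (B : PySem.Set (List Int)) (h : B.Nodup) : (pvGrow B).Nodup :=
  pv_growFold_nodup B B h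

-- ---------------------------------------------------------------------------
-- Stage 4: pvScan characterisation
-- ---------------------------------------------------------------------------

theorem pv_scan_found (target : List Int) : ∀ (F : List (List Int)) (fuel : Nat)
    (nx : List (List Int)) (S : PySem.Set (List Int)) (dist : Int),
    target ∈ F → F.length ≤ fuel →
    pvScan target fuel F nx S dist = .inl dist := by
  intro F
  induction F with
  | nil => intro fuel nx S dist h _; simp at h
  | cons a F ih =>
    intro fuel nx S dist hmem hlen
    cases fuel with
    | zero => simp at hlen
    | succ fuel =>
      simp only [pvScan]
      by_cases ha : a = target
      · rw [if_pos ha]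
      · rw [if_neg ha]
        have ht : target ∈ F := by
          rcases List.mem_cons.mp hmem with h | h
          · exact absurd h.symm ha
          · exact h
        exact ih fuel _ _ dist ht (by simp at hlen; omega)

theorem pv_scan_complete (target : List Int) : ∀ (F : List (List Int)) (fuel : Nat)
    (nx : List (List Int)) (S : PySem.Set (List Int)) (dist : Int),
    target ∉ F → F.length ≤ fuel →
    pvScan target fuel F nx S dist =
      .inr (fuel - F.length, (pvLevelExp F (S, nx)).2, (pvLevelExp F (S, nx)).1) := by
  intro F
  induction F with
  | nil => intro fuel nx S dist _ _; simp [pvScan, pvLevelExp]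
  | cons a F ih =>
    intro fuel nx S dist hmem hlen
    cases fuel with
    | zero => simp at hlen
    | succ fuel =>
      simp only [pvScan]
      have ha : ¬ (a = target) := fun h => hmem (by rw [h]; exact List.mem_cons_self ..)
      rw [if_neg ha]
      have ht : target ∉ F := fun h => hmem (List.mem_cons_of_mem _ h)
      rw [ih fuel _ _ dist ht (by simp at hlen; omega)]
      simp only [pvLevelExp, List.foldl_cons, List.length_cons, Nat.succ_sub_succ]

-- ---------------------------------------------------------------------------
-- Stage 5: counting
-- ---------------------------------------------------------------------------

theorem pv_nodup_length_le {α : Type} [DecidableEq α] (S T : List α) (hS : S.Nodup)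
    (hsub : ∀ x ∈ S, x ∈ T) : S.length ≤ T.length := by
  have h1 : S.toFinset.card = S.length := List.toFinset_card_of_nodup hS
  have h2 : S.toFinset ⊆ T.toFinset := by
    intro x hx
    rw [List.mem_toFinset] at hx ⊢
    exact hsub x hx
  have h3 := Finset.card_le_card h2
  have h4 := T.toFinset_card_le
  omega

theorem pv_factorial_le (n : Nat) : Nat.factorial n ≤ (n + 1) ^ (n + 1) := by
  calc Nat.factorial n ≤ n ^ n := Nat.factorial_le_pow n
    _ ≤ (n + 1) ^ n := Nat.pow_le_pow_left (by omega) n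
    _ ≤ (n + 1) ^ (n + 1) := Nat.pow_le_pow_right (by omega) (by omega)

-- ---------------------------------------------------------------------------
-- Stage 6: the bridge pvLevels = pvClosure
-- ---------------------------------------------------------------------------

theorem pv_bridge (base target : List Int) :
    ∀ (fb fa : Nat) (F S B : List (List Int)) (dist : Int),
    (∀ x, x ∈ S ↔ x ∈ B) →
    (∀ x ∈ S, x ∉ F → ∀ y ∈ pvNeighbours x, y ∈ S) →
    (target ∈ S → target ∈ F) →
    (∀ x ∈ F, x ∈ S) →
    S.Nodup → B.Nodup →
    (∀ x ∈ S, x ∈ base.permutations) →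
    base.permutations.length + F.length + 1 ≤ fa + S.length →
    base.permutations.length + 1 ≤ fb + B.length →
    pvLevels target fa F S dist = pvClosure target fb B dist := by
  intro fb
  induction fb with
  | zero =>
    intro fa F S B dist hSB hcl hT hFS hndS hndB hperm hfa hfb
    exfalso
    have hBp : ∀ x ∈ B, x ∈ base.permutations := fun x hx => hperm x ((hSB x).mpr hx)
    have := pv_nodup_length_le B base.permutations hndB hBp
    omega
  | succ m ih =>
    intro fa F S B dist hSB hcl hT hFS hndS hndB hperm hfa hfb
    have hcap : S.length ≤ base.permutations.length := pv_nodup_length_le _ _ hndS hperm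
    have hlenSB : S.length = B.length :=
      ((List.perm_ext_iff_of_nodup hndS hndB).mpr hSB).length_eq
    cases F with
    | nil =>
      have htB : target ∉ B := fun h => by simpa using hT ((hSB target).mpr h)
      rw [pvClosure, if_neg htB]
      have hclosed : ∀ x, x ∈ pvGrow B → x ∈ B := by
        intro x hx
        rcases (pv_grow_mem B x).mp hx with h | ⟨b, hb, hy⟩
        · exact h
        · have hbS := (hSB b).mpr hb
          have := hcl b hbS (by simp) x ((pv_mem_moves_iff b x).mp hy)
          exact (hSB x).mp this
      obtain ⟨ext, hext⟩ := pv_grow_ext B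
      have hnd := pv_grow_nodup B hndB
      have hε : ext = [] := by
        cases hx : ext with
        | nil => rfl
        | cons e es =>
          exfalso
          rw [hx] at hext
          have heB : e ∈ B := hclosed e (by rw [hext]; simp)
          have hdisj := (List.nodup_append.mp (hext ▸ hnd)).2.2
          exact hdisj e heB e (by simp) rfl
      rw [if_pos (by rw [hext, hε]; simp)]
      simp [pvLevels]
    | cons a F' =>
      have hfa' : (a :: F').length + 1 ≤ fa := by
        have := List.length_cons (a := a) (as := F')
        omega
      by_cases htF : target ∈ a :: F'
      · have hscan := pv_scan_found target (a :: F') fa [] S dist htF (by omega)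
        have htB : target ∈ B := (hSB target).mp (hFS target htF)
        rw [pvLevels, pvClosure, if_pos htB]
        split
        · rename_i ans hh
          rw [hscan] at hh
          cases hh
          rfl
        · rename_i f' next seen' hh
          rw [hscan] at hh
          cases hh
      · have htS : target ∉ S := fun h => htF (hT h)
        have htB : target ∉ B := fun h => htS ((hSB target).mpr h)
        have hscan := pv_scan_complete target (a :: F') fa [] S dist htF (by omega)
        rw [pvLevels, pvClosure, if_neg htB]
        obtain ⟨extS, hS1, hS2⟩ := pv_levelExp_ext (a :: F') S []
        obtain ⟨extB, hB1⟩ := pv_grow_ext B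
        have hS2' : (pvLevelExp (a :: F') (S, [])).2 = extS := by rw [hS2]; simp
        have hmemEq : ∀ x, x ∈ (pvLevelExp (a :: F') (S, [])).1 ↔ x ∈ pvGrow B := by
          intro x
          rw [pv_levelExp_mem, pv_grow_mem]
          constructor
          · rintro (h | ⟨b, hb, hy⟩)
            · exact Or.inl ((hSB x).mp h)
            · exact Or.inr ⟨b, (hSB b).mp (hFS b hb), (pv_mem_moves_iff b x).mpr hy⟩
          · rintro (h | ⟨b, hb, hy⟩)
            · exact Or.inl ((hSB x).mpr h)
            · have hbS := (hSB b).mpr hb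
              by_cases hbF : b ∈ a :: F'
              · exact Or.inr ⟨b, hbF, (pv_mem_moves_iff b x).mp hy⟩
              · exact Or.inl (hcl b hbS hbF x ((pv_mem_moves_iff b x).mp hy))
        have hndE : (pvLevelExp (a :: F') (S, [])).1.Nodup := pv_levelExp_nodup _ _ hndS
        have hndG : (pvGrow B).Nodup := pv_grow_nodup B hndB
        have hlenEq : (pvLevelExp (a :: F') (S, [])).1.length = (pvGrow B).length :=
          ((List.perm_ext_iff_of_nodup hndE hndG).mpr hmemEq).length_eq
        have l1 : S.length + extS.length = (pvLevelExp (a :: F') (S, [])).1.length := by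
          rw [hS1]; simp
        have l2 : B.length + extB.length = (pvGrow B).length := by rw [hB1]; simp
        split
        · rename_i ans hh
          rw [hscan] at hh
          cases hh
        · rename_i f' next seen' hh
          rw [hscan] at hh
          injection hh with hh1
          injection hh1 with h1 h2
          injection h2 with h2 h3
          subst h1; subst h2; subst h3
          by_cases hstop : (pvGrow B).length = B.length
          · rw [if_pos hstop]
            have hES : extS = [] := by
              have : extS.length = 0 := by omega
              exact List.eq_nil_of_length_eq_zero this
            rw [hS2', hES]
            simp [pvLevels]
          · rw [if_neg hstop]
            rw [hS2']
            apply ih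
            · exact hmemEq
            · intro x hx hnx y hy
              have hxS : x ∈ S := by
                rw [hS1] at hx
                rcases List.mem_append.mp hx with h | h
                · exact h
                · exact absurd h hnx
              rw [pv_levelExp_mem]
              by_cases hxF : x ∈ a :: F'
              · exact Or.inr ⟨x, hxF, hy⟩
              · exact Or.inl (hcl x hxS hxF y hy)
            · intro h
              rw [hS1] at h
              rcases List.mem_append.mp h with h | h
              · exact absurd h htS
              · exact h
            · intro x hx
              rw [hS1]
              exact List.mem_append.mpr (Or.inr hx)
            · exact hndE
            · exact hndG
            · intro x hx
              rcases (pv_levelExp_mem _ _ x).mp hx with h | ⟨b, hb, hy⟩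
              · exact hperm x h
              · have hbp : b ∈ base.permutations := hperm b (hFS b hb)
                rw [List.mem_permutations] at hbp ⊢
                exact (pv_perm_of_mem_neighbours b x hy).trans hbp
            · omega
            · have hextB : 1 ≤ extB.length := by
                rcases Nat.eq_zero_or_pos extB.length with h0 | h0
                · exfalso; exact hstop (by omega)
                · exact h0
              omega

-- ===== VERDICT (by name: the statement is the Claim_ definition above) =====
theorem minSplitMerge_spec : Claim_equal_minSplitMerge := by
  intro nums1 nums2 _
  unfold Spec_minSplitMerge minSplitMerge minSplitMerge_alt
  have h := pv_levels_sim nums2 ((nums1.length + 1) ^ (nums1.length + 1) + 1)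
    [nums1] [nums1] 0
  have e1 : ([nums1].map (fun a => (a, (0 : Int)))) = [(nums1, 0)] := rfl
  have e2 : ([nums1].map pvHash) = PySem.Set.ofList [pvHash nums1] := rfl
  have e3 : (PySem.Set.ofList [nums1] : PySem.Set (List Int)) = [nums1] := rfl
  rw [e1, e2] at h
  rw [h, e3]
  apply pv_bridge nums1 nums2
  · intro x; rfl
  · intro x hx hnx; simp at hx; simp [hx] at hnx
  · exact fun h => h
  · exact fun x hx => hx
  · simp
  · simp
  · intro x hx; simp at hx; subst hx; simp [List.mem_permutations]
  · have := pv_factorial_le nums1.length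
    simp [List.length_permutations]
    omega
  · have := pv_factorial_le nums1.length
    simp [List.length_permutations]
    omega
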